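-- pv_equiv track=rewrite | github.com/gnarlyman/oblivion-reborn | research/strict_cnto_audit.py | slot_names
-- ===== SOURCE A (Python) =====
-- def slot_names(mask):
--     names = []
--     SLOTS = ["Head", "Hair", "UpperBody", "LowerBody", "Hand", "Foot",
--              "RightRing", "LeftRing", "Amulet", "Weapon", "BackWeapon",
--              "SideWeapon", "Quiver", "Shield", "Torch", "Tail"]
--     for i, n in enumerate(SLOTS):
--         if mask & (1 << i):
--             names.append(n)
--     return names
-- ===== SOURCE B (Python) =====
-- def slot_names(mask):
--     SLOTS = ["Head", "Hair", "UpperBody", "LowerBody", "Hand", "Foot",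
--              "RightRing", "LeftRing", "Amulet", "Weapon", "BackWeapon",
--              "SideWeapon", "Quiver", "Shield", "Torch", "Tail"]
--     names = []
--     m = mask & 0xFFFF          # only the 16 valid slot bits matter (handles negatives too)
--     while m:                   # one iteration per set bit, highest bit first
--         i = m.bit_length() - 1
--         names.append(SLOTS[i])
--         m -= 1 << i
--     return names[::-1]         # emit in increasing slot order
-- ===== Notes on version B (the rewrite author's own statement) =====
-- stated objective: alternative
-- what changed: Instead of scanning every slot position unconditionally, B masks to the valid slot bits and repeatedly extracts the highest remaining set bit via bit_length (one loop iteration per set bit), then reverses to restore increasing slot order.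
import Mathlib
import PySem

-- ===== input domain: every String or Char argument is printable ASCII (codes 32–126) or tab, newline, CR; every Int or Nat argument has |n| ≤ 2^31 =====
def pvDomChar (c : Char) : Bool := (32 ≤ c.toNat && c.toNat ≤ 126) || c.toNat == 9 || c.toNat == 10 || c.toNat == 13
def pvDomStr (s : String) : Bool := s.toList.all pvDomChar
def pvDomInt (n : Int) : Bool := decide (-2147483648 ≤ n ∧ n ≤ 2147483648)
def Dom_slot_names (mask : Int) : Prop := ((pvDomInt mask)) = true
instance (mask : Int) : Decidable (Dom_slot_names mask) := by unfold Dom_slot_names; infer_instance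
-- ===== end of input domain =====

-- B walks the set bits of mask & 0xFFFF from the highest slot down (one loop step per set bit,
-- reversing at the end) instead of A's unconditional scan of all 16 slot positions; objective: alternative.


-- ===== PORT A =====
-- the SLOTS literal (shared data constant of both ports)
def pvSLOTS : List String :=
  ["Head", "Hair", "UpperBody", "LowerBody", "Hand", "Foot",
   "RightRing", "LeftRing", "Amulet", "Weapon", "BackWeapon",
   "SideWeapon", "Quiver", "Shield", "Torch", "Tail"]

-- for i, n in enumerate(SLOTS): if mask & (1 << i): names.append(n)
-- (enumerate indices are ≥ 0, so `.toNat` on the shift count is exact)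
def slot_names (mask : Int) : List String :=
  (PySem.List.enumerate pvSLOTS).foldl
    (fun names p =>
      if PySem.Int.band mask ((1 : Int) <<< (p.1.toNat : Int)) ≠ 0 then names ++ [p.2] else names)
    []

-- ===== PORT B =====
-- while m: i = m.bit_length() - 1; names.append(SLOTS[i]); m -= 1 << i
-- (m = mask & 0xFFFF is nonnegative, so it is carried as a Nat — exact; SLOTS[i] is always
-- in range because m ≤ 0xFFFF, so getD's default "" is never used)
def pvLoopB (m : Nat) : List String :=
  if h : m = 0 then []
  else
    let i := PySem.Int.bitLength (m : Int) - 1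
    pvSLOTS.getD i "" :: pvLoopB (m - 2 ^ i)
  termination_by m
  decreasing_by exact Nat.sub_lt (Nat.pos_of_ne_zero h) (Nat.two_pow_pos _)

def slot_names_alt (mask : Int) : List String :=
  (pvLoopB ((PySem.Int.band mask 65535).toNat)).reverse    -- names[::-1]

-- ===== PRECONDITION & SPEC =====
def Spec_slot_names (mask : Int) (out : List String) : Prop := out = slot_names_alt mask
instance (mask : Int) (out : List String) : Decidable (Spec_slot_names mask out) := by unfold Spec_slot_names; infer_instance

-- ===== CLAIM (what is proved, stated in full; the proofs are below) =====
def Claim_equal_slot_names : Prop := ∀ (mask : Int), Dom_slot_names mask → Spec_slot_names mask (slot_names mask)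

-- ===== LEMMAS AND PROOFS =====

-- the common characterisation: the names of the slots picked by the low 16 bits of the mask
def pvSpecL (n : Nat) : List String :=
  ((List.range 16).filter (fun i => n.testBit i)).map (fun i => pvSLOTS.getD i "")

-- the low 16 bits of the mask, as a Nat
def pvLow (mask : Int) : Nat := (PySem.Int.band mask 65535).toNat

-- Python & with a nonnegative right operand, by sign of the left one
lemma pvBand_natRight (a : Int) (n : Nat) :
    PySem.Int.band a ↑n
      = if 0 ≤ a then ((a.toNat &&& n : Nat) : Int) else ((n - (n &&& (-a-1).toNat) : Nat) : Int) := by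
  have hn : (0:Int) ≤ ↑n := Int.natCast_nonneg n
  unfold PySem.Int.band
  split_ifs <;> simp_all

lemma pvLow_lt (mask : Int) : pvLow mask < 65536 := by
  have h65 : (65535 : Int) = ((65535:Nat) : Int) := by norm_num
  unfold pvLow
  rw [h65, pvBand_natRight]
  have e2 : mask.toNat &&& 65535 = mask.toNat % 65536 := Nat.and_two_pow_sub_one_eq_mod mask.toNat 16
  split_ifs <;> simp <;> omega

-- Python's `mask & (1 << i)` is nonzero exactly when bit i of the low-16 Nat is set
lemma pvBit_iff (mask : Int) (i : Nat) (h : i < 16) :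
    (PySem.Int.band mask ((1 : Int) <<< (i : Int)) ≠ 0) ↔ (pvLow mask).testBit i := by
  have hsh : (1 : Int) <<< (i : Int) = ((2 ^ i : Nat) : Int) := by
    have h0 : (1:Int) <<< (i:Int) = ((Nat.shiftLeft' false 1 i : Nat) : Int) := rfl
    rw [h0, Nat.shiftLeft'_false, Nat.shiftLeft_eq, one_mul]
  have h65 : (65535 : Int) = ((65535:Nat) : Int) := by norm_num
  unfold pvLow
  rw [hsh, h65, pvBand_natRight, pvBand_natRight]
  by_cases h1 : 0 ≤ mask
  · rw [if_pos h1, if_pos h1]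
    set a := mask.toNat
    have e1 : a &&& 2^i = (a.testBit i).toNat * 2^i := Nat.and_two_pow a i
    have e2 : a &&& 65535 = a % 2 ^ 16 := Nat.and_two_pow_sub_one_eq_mod a 16
    have e3 : (a % 2 ^ 16).testBit i = a.testBit i := by
      rw [Nat.testBit_mod_two_pow]; simp [h]
    simp only [ne_eq, Int.natCast_eq_zero, Int.toNat_natCast, e1, e2, e3]
    have hp := Nat.two_pow_pos i
    rcases Bool.eq_false_or_eq_true (a.testBit i) with hb | hb <;> rw [hb] <;> simp
  · rw [if_neg h1, if_neg h1]
    set c := (-mask - 1).toNat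
    have e1 : 2^i &&& c = (c.testBit i).toNat * 2^i := by
      rw [Nat.land_comm]; exact Nat.and_two_pow c i
    have e3 : (65535:Nat) &&& c = c % 65536 := by
      rw [Nat.land_comm]; exact Nat.and_two_pow_sub_one_eq_mod c 16
    have e5 : c.testBit i = decide (c/2^i%2 = 1) := Nat.testBit_eq_decide_div_mod_eq
    have e6 : (65535 - c % 65536).testBit i = decide ((65535 - c%65536)/2^i%2 = 1) :=
      Nat.testBit_eq_decide_div_mod_eq
    have e7 : (65535 - c%65536)/2^i%2 = 1 - c/2^i%2 := by interval_cases i <;> omega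
    have hp := Nat.two_pow_pos i
    simp only [ne_eq, Int.natCast_eq_zero, Int.toNat_natCast, e1, e3, e6, e7, e5]
    have hx : c/2^i%2 = 0 ∨ c/2^i%2 = 1 := by omega
    rcases hx with hx | hx <;> simp [hx]

lemma pvEnum_eq : PySem.List.enumerate pvSLOTS
    = (List.range 16).map (fun i : Nat => ((i : Int), pvSLOTS.getD i "")) := by decide

-- A's append-if loop is a filter + map
lemma pvFoldl_if_append {α β : Type} (P : α → Prop) [DecidablePred P] (f : α → β) :
    ∀ (l : List α) (acc : List β),
      l.foldl (fun ns x => if P x then ns ++ [f x] else ns) acc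
        = acc ++ (l.filter (fun x => decide (P x))).map f := by
  intro l
  induction l with
  | nil => intro acc; simp
  | cons x xs ih =>
    intro acc
    by_cases hx : P x <;> simp [List.foldl_cons, hx, ih]

-- A computes pvSpecL of the low 16 bits
lemma slot_names_eq (mask : Int) : slot_names mask = pvSpecL (pvLow mask) := by
  unfold slot_names pvSpecL
  rw [pvFoldl_if_append
    (fun p : Int × String => PySem.Int.band mask ((1 : Int) <<< (p.1.toNat : Int)) ≠ 0)
    (fun p => p.2)]
  rw [pvEnum_eq, List.filter_map]
  rw [List.filter_congr (l := List.range 16)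
    (q := fun i : Nat => (pvLow mask).testBit i) (by
      intro i hi
      have hi16 : i < 16 := List.mem_range.mp hi
      simp only [Function.comp, Int.toNat_natCast]
      have h2 := pvBit_iff mask i hi16
      unfold pvLow at h2
      rcases Bool.eq_false_or_eq_true ((PySem.Int.band mask 65535).toNat.testBit i) with hb | hb <;>
        simp_all [pvLow])]
  simp [Function.comp, pvLow]

-- splitting off the highest set bit of 2^i + m' (m' < 2^i) on the filtered index list
lemma pvFilter_split (m' i : Nat) (h : m' < 2 ^ i) (k : Nat) :
    (List.range k).filter (fun j => (2 ^ i + m').testBit j)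
      = (List.range k).filter (fun j => m'.testBit j) ++ (if i < k then [i] else []) := by
  induction k with
  | zero => simp
  | succ k ih =>
    rw [List.range_succ, List.filter_append, List.filter_append, ih]
    rcases Nat.lt_trichotomy k i with hk | hk | hk
    · have h1 : (2 ^ i + m').testBit k = m'.testBit k := Nat.testBit_two_pow_add_gt hk m'
      have h2 : ¬ i < k + 1 := by omega
      have h3 : ¬ i < k := by omega
      simp [h1, h2, h3, List.filter]
    · subst hk
      have h1 : (2 ^ k + m').testBit k = true := by
        rw [Nat.testBit_two_pow_add_eq, Nat.testBit_lt_two_pow h]; rfl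
      have h2 : m'.testBit k = false := Nat.testBit_lt_two_pow h
      simp [h1, h2, List.filter]
    · have hik : (2:Nat) ^ (i+1) ≤ 2 ^ k := Nat.pow_le_pow_right (by norm_num) hk
      have h1 : (2 ^ i + m').testBit k = false := by
        apply Nat.testBit_lt_two_pow
        have := Nat.two_pow_pos i
        calc 2 ^ i + m' < 2 ^ i + 2 ^ i := by omega
          _ = 2 ^ (i+1) := by ring
          _ ≤ 2 ^ k := hik
      have h2 : m'.testBit k = false := by
        apply Nat.testBit_lt_two_pow
        calc m' < 2 ^ i := h
          _ ≤ 2 ^ k := Nat.pow_le_pow_right (by norm_num) (by omega)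
      have h3 : i < k + 1 := by omega
      simp [h1, h2, h3, hk, List.filter]

-- B's loop produces pvSpecL backwards
lemma pvLoopB_eq (m : Nat) (hm : m < 65536) : pvLoopB m = (pvSpecL m).reverse := by
  induction m using Nat.strong_induction_on with
  | _ m ih =>
    by_cases h0 : m = 0
    · subst h0
      rw [pvLoopB]
      simp [pvSpecL, Nat.zero_testBit]
    · rw [pvLoopB]
      rw [dif_neg h0]
      set i := PySem.Int.bitLength (m : Int) - 1 with hi
      have hbl := PySem.Int.lt_two_pow_bitLength (m : Int)
      have hbl2 := PySem.Int.two_pow_bitLength_le (m : Int) (by exact_mod_cast h0)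
      rw [Int.natAbs_natCast] at hbl hbl2
      have hblpos : 1 ≤ PySem.Int.bitLength (m : Int) := by
        by_contra hc
        push Not at hc
        interval_cases hb : PySem.Int.bitLength (m : Int)
        · simp at hbl; omega
      have hup : m < 2 ^ (i + 1) := by
        have h2 : i + 1 = PySem.Int.bitLength (m : Int) := by omega
        rw [h2]; exact hbl
      have hlow : 2 ^ i ≤ m := hbl2
      have hi16 : i < 16 := by
        by_contra hc
        push Not at hc
        have h2 : (2:Nat) ^ 16 ≤ 2 ^ i := Nat.pow_le_pow_right (by norm_num) hc
        have h3 : (65536:Nat) = 2 ^ 16 := by norm_num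
        omega
      set m' := m - 2 ^ i with hm'
      have hdec : m = 2 ^ i + m' := by omega
      have hm'lt : m' < 2 ^ i := by omega
      have ihm : pvLoopB m' = (pvSpecL m').reverse := by
        apply ih
        · have := Nat.two_pow_pos i; omega
        · omega
      simp only []
      rw [show (m - 2^i) = m' from rfl, ihm]
      have hsp : pvSpecL m = pvSpecL m' ++ [pvSLOTS.getD i ""] := by
        unfold pvSpecL
        rw [hdec, pvFilter_split m' i hm'lt 16, if_pos hi16, List.map_append]
        simp
      rw [hsp]
      simp

lemma slot_names_alt_eq (mask : Int) : slot_names_alt mask = pvSpecL (pvLow mask) := by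
  unfold slot_names_alt
  rw [show (PySem.Int.band mask 65535).toNat = pvLow mask from rfl,
    pvLoopB_eq (pvLow mask) (pvLow_lt mask), List.reverse_reverse]

-- ===== VERDICT (by name: the statement is the Claim_ definition above) =====
theorem slot_names_spec : Claim_equal_slot_names := by
  intro mask _
  unfold Spec_slot_names
  rw [slot_names_eq, slot_names_alt_eq]
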